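-- pv_equiv track=rewrite | github.com/dpflann/Project_Euler | pe46/pe46.py | find_smallest_non_goldbach
-- ===== SOURCE A (Python) =====
-- def primes_sieve(limit):
--     a = [True] * limit                          # Initialize the primality list
--     a[0] = a[1] = False
--
--     for (i, isprime) in enumerate(a):
--         if isprime:
--             yield i
--             for n in range(i*i, limit, i):     # Mark factors non-primes_sieve
--                 a[n] = False
--
-- def find_smallest_non_goldbach(limit=1000):
--     primes = list(primes_sieve(limit))
--     square_tables = set([2*n**2 for n in range(1, limit)])
--     N = 9
--     while True:
--         if N not in primes and not any([N - p in square_tables for p in primes]):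
--             return N
--         N += 2
-- ===== SOURCE B (Python) =====
-- def primes_sieve(limit):
--     a = [True] * limit                          # Initialize the primality list
--     a[0] = a[1] = False
--
--     for (i, isprime) in enumerate(a):
--         if isprime:
--             yield i
--             for n in range(i*i, limit, i):     # Mark factors non-primes
--                 a[n] = False
--
-- def find_smallest_non_goldbach(limit=1000):
--     primes = set(primes_sieve(limit))
--     N = 9
--     while True:
--         if N not in primes:
--             found = False
--             for n in range(1, limit):
--                 s = 2 * n * n
--                 if s >= N:
--                     break
--                 if N - s in primes:
--                     found = True
--                     break
--             if not found:
--                 return N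
--         N += 2
-- ===== Notes on version B (the rewrite author's own statement) =====
-- stated objective: faster
-- what changed: B inverts the decomposition search: instead of scanning the whole prime list and testing N - p against a precomputed set of doubled squares, it walks n = 1, 2, ... while 2*n*n < N and tests N - 2*n*n for membership in the prime set, so each candidate N needs an O(sqrt(N)) scan with set lookups instead of a scan over all primes below the limit with list/set operations.
import Mathlib
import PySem

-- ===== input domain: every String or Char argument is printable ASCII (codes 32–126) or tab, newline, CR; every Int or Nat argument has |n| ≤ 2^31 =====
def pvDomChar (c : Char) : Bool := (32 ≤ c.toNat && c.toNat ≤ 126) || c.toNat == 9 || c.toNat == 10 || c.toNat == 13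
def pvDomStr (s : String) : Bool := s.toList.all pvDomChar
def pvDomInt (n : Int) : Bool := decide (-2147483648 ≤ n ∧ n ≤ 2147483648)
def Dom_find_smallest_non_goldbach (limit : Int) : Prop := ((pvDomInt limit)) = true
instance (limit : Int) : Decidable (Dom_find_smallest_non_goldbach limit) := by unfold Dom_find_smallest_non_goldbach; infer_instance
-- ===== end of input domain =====

-- B inverts A's inner search: instead of scanning the whole prime list and testing N - p against a
-- set of doubled squares, it scans n = 1, 2, … while 2*n*n < N and tests N - 2*n*n for membership
-- in the prime set (objective: alternative decomposition with a shorter inner scan).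

-- ===== PORT A =====
-- helper: the statement `a[n] = False` for every n of a range (inner loop of `primes_sieve`)
def sieveMark (a : List Bool) (ns : List Int) : List Bool :=
  ns.foldl (fun a n => a.set n.toNat false) a

theorem sieveMark_length (a : List Bool) (ns : List Int) : (sieveMark a ns).length = a.length := by
  induction ns generalizing a with
  | nil => rfl
  | cons n ns ih => simpa [sieveMark] using (ih (a.set n.toNat false)).trans (by simp)

-- the generator `primes_sieve`, consumed fully by list(...): `for (i, isprime) in enumerate(a)`
-- iterates by index over the evolving list, yielding i and marking its multiples when a[i] is true
def sieveLoop (limit : Int) (a : List Bool) (i : Nat) : List Int :=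
  if h : i < a.length then
    if a.getD i false then
      (i : Int) :: sieveLoop limit (sieveMark a (PySem.List.pyRange ((i : Int) * i) limit i)) (i + 1)
    else
      sieveLoop limit a (i + 1)
  else []
termination_by a.length - i
decreasing_by all_goals simp_all [sieveMark_length]; omega

-- guard `limit < 2`: there the Python raises IndexError (a[0] / a[1]); excluded by Pre_
def primes_sieve (limit : Int) : List Int :=
  if limit < 2 then []
  else sieveLoop limit (((List.replicate limit.toNat true).set 0 false).set 1 false) 0

-- fuel for the `while True` loop (port artifact): a bound larger than the number of iterations the
-- Python performs; both ports run the identical iteration sequence step for step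
def pvFuel (limit : Int) : Nat := (2 * limit * limit + 100).toNat

def loopA (primes : List Int) (squares : PySem.Set Int) : Nat → Int → Int
  | 0, N => N
  | fuel + 1, N =>
    if !(primes.contains N) && !(primes.any fun p => PySem.Set.contains squares (N - p)) then N
    else loopA primes squares fuel (N + 2)

def find_smallest_non_goldbach (limit : Int) : Int :=
  let primes := primes_sieve limit
  let square_tables : PySem.Set Int :=
    PySem.Set.ofList ((PySem.List.pyRange 1 limit 1).map (fun n => 2 * n ^ 2))
  loopA primes square_tables (pvFuel limit) 9

-- ===== PORT B =====
-- Source B's inner `for n in range(1, limit)` with its two breaks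
def innerB (primes : PySem.Set Int) (N : Int) : List Int → Bool
  | [] => false
  | n :: rest =>
    if 2 * n * n ≥ N then false
    else if PySem.Set.contains primes (N - 2 * n * n) then true
    else innerB primes N rest

def loopB (primes : PySem.Set Int) (limit : Int) : Nat → Int → Int
  | 0, N => N
  | fuel + 1, N =>
    if !(PySem.Set.contains primes N) then
      if !(innerB primes N (PySem.List.pyRange 1 limit 1)) then N
      else loopB primes limit fuel (N + 2)
    else loopB primes limit fuel (N + 2)

def find_smallest_non_goldbach_alt (limit : Int) : Int :=
  let primes : PySem.Set Int := PySem.Set.ofList (primes_sieve limit)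
  loopB primes limit (pvFuel limit) 9

-- ===== PRECONDITION & SPEC =====
-- Pre_ excludes exactly limit < 2, where the Python A raises IndexError (a[0] = a[1] = False)
def Pre_find_smallest_non_goldbach (limit : Int) : Prop := 2 ≤ limit
instance (limit : Int) : Decidable (Pre_find_smallest_non_goldbach limit) := by
  unfold Pre_find_smallest_non_goldbach; infer_instance
def pvWitness_find_smallest_non_goldbach : Int := 10

def Spec_find_smallest_non_goldbach (limit : Int) (out : Int) : Prop := out = find_smallest_non_goldbach_alt limit
instance (limit : Int) (out : Int) : Decidable (Spec_find_smallest_non_goldbach limit out) := by unfold Spec_find_smallest_non_goldbach; infer_instance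

-- ===== CLAIM (what is proved, stated in full; the proofs are below) =====
def Claim_equal_find_smallest_non_goldbach : Prop := ∀ (limit : Int), Dom_find_smallest_non_goldbach limit → Pre_find_smallest_non_goldbach limit → Spec_find_smallest_non_goldbach limit (find_smallest_non_goldbach limit)

-- ===== LEMMAS AND PROOFS =====

-- a single `a[n] = False` write never turns a false entry true
theorem set_false_getD_false (a : List Bool) (n j : Nat) (h : a.getD j false = false) :
    (a.set n false).getD j false = false := by
  simp [List.getD_eq_getElem?_getD, List.getElem?_set] at *
  split
  · split <;> simp_all
  · exact h

theorem sieveMark_getD_false (a : List Bool) (ns : List Int) (j : Nat)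
    (h : a.getD j false = false) : (sieveMark a ns).getD j false = false := by
  induction ns generalizing a with
  | nil => exact h
  | cons n ns ih => exact ih _ (set_false_getD_false a n.toNat j h)

-- with a[0] false, every yielded index is ≥ 1
theorem sieveLoop_pos (limit : Int) (a : List Bool) (i : Nat)
    (h0 : a.getD 0 false = false) : ∀ x ∈ sieveLoop limit a i, 1 ≤ x := by
  fun_induction sieveLoop limit a i with
  | case1 a i hlt hp ih =>
    intro x hx
    rcases List.mem_cons.mp hx with rfl | hx
    · have : i ≠ 0 := by rintro rfl; rw [h0] at hp; exact Bool.false_ne_true hp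
      omega
    · exact ih (sieveMark_getD_false _ _ _ h0) x hx
  | case2 a i hlt hp ih =>
    intro x hx
    exact ih h0 x hx
  | case3 a i hlt =>
    intro x hx
    exact absurd hx (List.not_mem_nil)

theorem primes_sieve_pos (limit : Int) : ∀ p ∈ primes_sieve limit, 1 ≤ p := by
  unfold primes_sieve
  split
  · intro p hp; exact absurd hp (List.not_mem_nil)
  · apply sieveLoop_pos
    apply set_false_getD_false
    simp [List.getD_eq_getElem?_getD, List.getElem?_set]
    split <;> simp

-- Source B's inner loop, on a sorted list of positive n, is the plain `any` over the whole range
theorem innerB_eq_any (primes : PySem.Set Int) (N : Int) (ns : List Int)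
    (hpos : ∀ n ∈ ns, (1 : Int) ≤ n) (hs : ns.Pairwise (· ≤ ·)) :
    innerB primes N ns
      = ns.any (fun n => decide (2 * n * n < N) && PySem.Set.contains primes (N - 2 * n * n)) := by
  induction ns with
  | nil => rfl
  | cons n ns ih =>
    rcases List.pairwise_cons.mp hs with ⟨hle, hs'⟩
    by_cases h1 : 2 * n * n ≥ N
    · rw [innerB, if_pos h1]
      symm
      rw [List.any_eq_false]
      intro m hm
      have hm2 : 2 * m * m ≥ N := by
        rcases List.mem_cons.mp hm with rfl | hm'
        · exact h1
        · have h1m : (1 : Int) ≤ n := hpos n (List.mem_cons_self)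
          have hnm : n ≤ m := hle m hm'
          nlinarith
      simp [not_lt.mpr hm2]
    · rw [innerB, if_neg h1]
      by_cases h2 : PySem.Set.contains primes (N - 2 * n * n) = true
      · rw [if_pos h2]
        symm
        have hmem : N - 2 * n * n ∈ primes := by simpa using h2
        simp [not_le.mp h1, hmem]
      · have h2' : N - 2 * n * n ∉ primes := by
          intro hmem; exact h2 (by simpa using hmem)
        rw [if_neg h2, ih (fun m hm => hpos m (List.mem_cons_of_mem n hm)) hs']
        simp [h2']

-- the two inner searches agree: ∃ p prime with N - p a doubled square ⟺ ∃ n with N - 2n² prime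
theorem any_eq_innerB (limit N : Int) (primes : List Int) (hpos : ∀ p ∈ primes, 1 ≤ p) :
    (primes.any fun p =>
        PySem.Set.contains
          (PySem.Set.ofList ((PySem.List.pyRange 1 limit 1).map (fun n => 2 * n ^ 2))) (N - p))
      = innerB (PySem.Set.ofList primes) N (PySem.List.pyRange 1 limit 1) := by
  rw [innerB_eq_any _ _ _ (fun n hn => (PySem.List.mem_pyRange_one.mp hn).1)
        ((PySem.List.pairwise_lt_pyRange_one 1 limit).imp le_of_lt)]
  rw [Bool.eq_iff_iff]
  simp only [List.any_eq_true, PySem.Set.contains_iff, PySem.Set.mem_ofList, List.mem_map,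
    PySem.List.mem_pyRange_one, Bool.and_eq_true, decide_eq_true_eq]
  constructor
  · rintro ⟨p, hp, n, ⟨hn1, hn2⟩, heq⟩
    refine ⟨n, ⟨hn1, hn2⟩, ?_, ?_⟩
    · have := hpos p hp
      have h2 : 2 * n ^ 2 = 2 * n * n := by ring
      omega
    · have h2 : 2 * n ^ 2 = 2 * n * n := by ring
      have : N - 2 * n * n = p := by omega
      rwa [this]
  · rintro ⟨n, ⟨hn1, hn2⟩, hlt, hmem⟩
    exact ⟨N - 2 * n * n, hmem, n, ⟨hn1, hn2⟩, by ring⟩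

-- list membership test versus the prime set's membership test
theorem contains_eq_set_contains (primes : List Int) (N : Int) :
    primes.contains N = PySem.Set.contains (PySem.Set.ofList primes) N := by
  rw [Bool.eq_iff_iff]
  simp [PySem.Set.mem_ofList]

-- the two while-loops run the identical iteration sequence
theorem loopA_eq_loopB (limit : Int) (primes : List Int) (squares : PySem.Set Int)
    (hc : ∀ N, (primes.any fun p => PySem.Set.contains squares (N - p))
            = innerB (PySem.Set.ofList primes) N (PySem.List.pyRange 1 limit 1))
    (fuel : Nat) (N : Int) :
    loopA primes squares fuel N = loopB (PySem.Set.ofList primes) limit fuel N := by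
  induction fuel generalizing N with
  | zero => rfl
  | succ fuel ih =>
    rw [loopA, loopB, hc, ← contains_eq_set_contains]
    cases h1 : primes.contains N with
    | true =>
      rw [if_neg (by simp), if_neg (by simp)]
      exact ih (N + 2)
    | false =>
      cases h2 : innerB (PySem.Set.ofList primes) N (PySem.List.pyRange 1 limit 1) with
      | false =>
        rw [if_pos (by simp), if_pos (by simp), if_pos (by simp)]
      | true =>
        rw [if_neg (by simp), if_pos (by simp), if_neg (by simp)]
        exact ih (N + 2)

-- ===== VERDICT (by name: the statement is the Claim_ definition above) =====
theorem find_smallest_non_goldbach_spec : Claim_equal_find_smallest_non_goldbach := by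
  intro limit _ _
  unfold Spec_find_smallest_non_goldbach find_smallest_non_goldbach find_smallest_non_goldbach_alt
  exact loopA_eq_loopB limit (primes_sieve limit) _
    (fun N => any_eq_innerB limit N (primes_sieve limit) (primes_sieve_pos limit)) (pvFuel limit) 9
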